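-- pv_equiv track=rewrite | github.com/pypi-data/pypi-mirror-20 | packages/miniserver/miniserver-0.1.0.tar.gz/miniserver-0.1.0/src/miniserver/routes.py | regex_from_route
-- ===== SOURCE A (Python) =====
-- def regex_escape(st):
--     return st
--
-- def regex_from_route(route):
--     """
--     Convert a route string in the form part1/part2/{varname}/ to a Django url
--     regex.
--     """
--     regex, tail = '', route
--
--     while tail:
--         pre, sep, tail = tail.partition('{')
--         regex += regex_escape(pre)
--         if sep:
--             varname, sep, tail = tail.partition('}')
--             if not sep:
--                 raise ValueError('brakets in route string do not match: %r' % route)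
--             regex += r'(?P<%s>[^\/]*)' % varname
--
--     return regex
-- ===== SOURCE B (Python) =====
-- def regex_from_route(route):
--     """
--     Convert a route string in the form part1/part2/{varname}/ to a Django url
--     regex.
--     """
--     chunks = route.split('}')
--     out = []
--     lit = []  # pending '{'-free chunks; the '}' between them are literal text
--     for idx, chunk in enumerate(chunks):
--         if '{' in chunk:
--             if idx == len(chunks) - 1:
--                 raise ValueError('brakets in route string do not match: %r' % route)
--             pre, var = chunk.split('{', 1)
--             out.append('}'.join(lit + [pre]))
--             out.append(r'(?P<%s>[^\/]*)' % var)
--             lit = []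
--         else:
--             lit.append(chunk)
--     out.append('}'.join(lit))
--     return ''.join(out)
-- ===== Notes on version B (the rewrite author's own statement) =====
-- stated objective: alternative
-- what changed: B splits the route once on '}' and folds over the chunks (flushing pending literal chunks when a chunk contains '{'), instead of A's while loop that repeatedly partitions the remaining tail on '{' and '}'.
import Mathlib
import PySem

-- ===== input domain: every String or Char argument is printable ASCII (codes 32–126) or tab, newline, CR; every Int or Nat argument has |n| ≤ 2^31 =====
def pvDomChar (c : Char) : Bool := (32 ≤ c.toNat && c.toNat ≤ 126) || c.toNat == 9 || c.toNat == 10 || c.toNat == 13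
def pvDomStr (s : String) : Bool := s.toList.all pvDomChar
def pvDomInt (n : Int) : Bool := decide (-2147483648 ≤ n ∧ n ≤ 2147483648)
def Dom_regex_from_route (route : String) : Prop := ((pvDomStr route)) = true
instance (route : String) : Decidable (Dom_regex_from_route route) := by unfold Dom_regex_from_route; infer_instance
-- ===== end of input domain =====

-- B replaces A's partition-driven while loop by splitting the route on '}' once and
-- folding over the chunks (objective: alternative decomposition; same cost).

-- r'(?P<%s>[^\/]*)' % v
def pvGrp (v : List Char) : List Char := "(?P<".toList ++ v ++ ">[^\\/]*)".toList

-- ===== PORT A =====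
-- the while loop of A; `none` = the ValueError branch (unmatched '{')
def aLoop : List Char → Option (List Char)
  | [] => some []
  | c :: t =>
    -- pre, sep, tail = tail.partition('{')
    let pre := (c :: t).takeWhile (· ≠ '{')
    match h1 : (c :: t).dropWhile (· ≠ '{') with
    | [] => some pre
    | _ :: t1 =>
      -- varname, sep, tail = tail.partition('}')
      match h2 : t1.dropWhile (· ≠ '}') with
      | [] => none
      | _ :: t2 => (aLoop t2).map (fun r => pre ++ pvGrp (t1.takeWhile (· ≠ '}')) ++ r)
termination_by l => l.length
decreasing_by
  have ha : ((c :: t).dropWhile (· ≠ '{')).length ≤ (c :: t).length :=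
    (List.dropWhile_sublist _).length_le
  have hb : (t1.dropWhile (· ≠ '}')).length ≤ t1.length :=
    (List.dropWhile_sublist _).length_le
  rw [h1] at ha; rw [h2] at hb
  simp at ha hb ⊢; omega

def regex_from_route (route : String) : String :=
  match aLoop route.toList with
  | some cs => String.ofList cs
  | none => ""   -- Python raises ValueError here; excluded by Pre_

-- ===== PORT B =====
-- route.split('}')
def pvSplitBrace : List Char → List (List Char)
  | [] => [[]]
  | c :: t =>
    if c = '}' then [] :: pvSplitBrace t
    else
      match pvSplitBrace t with
      | [] => [[c]]          -- unreachable: pvSplitBrace never returns []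
      | s :: ss => (c :: s) :: ss

-- '}'.join(lit)
def pvJoinBrace : List (List Char) → List Char
  | [] => []
  | [s] => s
  | s :: s' :: ss => s ++ '}' :: pvJoinBrace (s' :: ss)

-- the for loop of Source B over the chunks; state `lit` = pending '{'-free chunks;
-- `none` = the ValueError branch (a '{' in the last chunk)
def bGo (lit : List (List Char)) : List (List Char) → Option (List Char)
  | [] => some (pvJoinBrace lit)
  | chunk :: rest =>
    if '{' ∈ chunk then
      if rest.isEmpty then none
      else
        -- pre, var = chunk.split('{', 1)
        let pre := chunk.takeWhile (· ≠ '{')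
        let var := (chunk.dropWhile (· ≠ '{')).tail
        (bGo [] rest).map (fun r => pvJoinBrace (lit ++ [pre]) ++ pvGrp var ++ r)
    else bGo (lit ++ [chunk]) rest

def regex_from_route_alt (route : String) : String :=
  match bGo [] (pvSplitBrace route.toList) with
  | some cs => String.ofList cs
  | none => ""   -- Python raises ValueError here; excluded by Pre_

-- ===== PRECONDITION & SPEC =====
-- Pre_ excludes exactly the routes with an unclosed '{' (a '{' after the last '}'),
-- on which A raises ValueError (B raises the same ValueError there).
def Pre_regex_from_route (route : String) : Prop :=
  '{' ∉ route.toList.reverse.takeWhile (· ≠ '}')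
instance (route : String) : Decidable (Pre_regex_from_route route) := by
  unfold Pre_regex_from_route; infer_instance

def pvWitness_regex_from_route : String := "part1/part2/{varname}/"

def Spec_regex_from_route (route : String) (out : String) : Prop := out = regex_from_route_alt route
instance (route : String) (out : String) : Decidable (Spec_regex_from_route route out) := by unfold Spec_regex_from_route; infer_instance

-- ===== CLAIM (what is proved, stated in full; the proofs are below) =====
def Claim_equal_regex_from_route : Prop := ∀ (route : String), Dom_regex_from_route route → Pre_regex_from_route route → Spec_regex_from_route route (regex_from_route route)

-- ===== LEMMAS AND PROOFS =====

-- reference single-pass recursion both loops are reduced to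
def pvSpec : List Char → Option (List Char)
  | [] => some []
  | c :: t =>
    if c = '{' then
      match h : t.dropWhile (· ≠ '}') with
      | [] => none
      | _ :: t2 => (pvSpec t2).map (fun r => pvGrp (t.takeWhile (· ≠ '}')) ++ r)
    else (pvSpec t).map (c :: ·)
termination_by l => l.length
decreasing_by
  · have hb : (t.dropWhile (· ≠ '}')).length ≤ t.length :=
      (List.dropWhile_sublist _).length_le
    rw [h] at hb; simp at hb ⊢; omega
  · simp

theorem head_dropWhile_ne {x : Char} (l : List Char) (d : Char) (t : List Char)
    (h : l.dropWhile (· ≠ x) = d :: t) : d = x := by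
  induction l with
  | nil => simp at h
  | cons c cs ih =>
    by_cases hc : c = x
    · subst hc; simp [List.dropWhile] at h; exact h.1.symm
    · rw [List.dropWhile_cons_of_pos (by simp [hc])] at h; exact ih h





theorem pvSpec_no_brace (l : List Char) (h : '{' ∉ l) : pvSpec l = some l := by
  induction l with
  | nil => simp [pvSpec]
  | cons c t ih =>
    simp at h
    have hc : c ≠ '{' := fun e => h.1 e.symm
    rw [pvSpec, if_neg hc, ih h.2]; simp

theorem pvSpec_append (p t : List Char) (h : '{' ∉ p) :
    pvSpec (p ++ t) = (pvSpec t).map (fun r => p ++ r) := by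
  induction p with
  | nil => cases h' : pvSpec t <;> simp [h']
  | cons c p' ih =>
    simp at h
    have hc : c ≠ '{' := fun e => h.1 e.symm
    rw [List.cons_append, pvSpec, if_neg hc, ih h.2]
    cases pvSpec t <;> simp

theorem pvSpec_open_none (cur : List Char) (ho : '{' ∈ cur) (hc : '}' ∉ cur) :
    pvSpec cur = none := by
  induction cur with
  | nil => simp at ho
  | cons c t ih =>
    simp at ho hc
    by_cases h1 : c = '{'
    · subst h1
      rw [pvSpec, if_pos rfl]
      have hd : t.dropWhile (· ≠ '}') = [] :=
        List.dropWhile_eq_nil_iff.mpr (fun x hx => by simp; exact fun e => hc.2 (e ▸ hx))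
      simp only [ne_eq] at hd ⊢
      split
      · rfl
      · next head t2 heq => rw [hd] at heq; cases heq
    · have ho' : '{' ∈ t := by
        rcases ho with h | h
        · exact absurd h.symm h1
        · exact h
      rw [pvSpec, if_neg h1, ih ho' hc.2]
      simp

theorem dropWhile_all_append (p : List Char) (x : Char) (t : List Char)
    (h : ∀ y ∈ p, y ≠ x) : (p ++ x :: t).dropWhile (· ≠ x) = x :: t := by
  induction p with
  | nil => simp
  | cons c cs ih =>
    simp at h
    rw [List.cons_append, List.dropWhile_cons_of_pos (by simp [h.1])]
    exact ih h.2

theorem takeWhile_all_append (p : List Char) (x : Char) (t : List Char)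
    (h : ∀ y ∈ p, y ≠ x) : (p ++ x :: t).takeWhile (· ≠ x) = p := by
  induction p with
  | nil => simp
  | cons c cs ih =>
    simp at h
    rw [List.cons_append, List.takeWhile_cons_of_pos (by simp [h.1])]
    rw [ih h.2]

theorem pvSpec_group (cur : List Char) (ho : '{' ∈ cur) (hc : '}' ∉ cur) (t' : List Char) :
    pvSpec (cur ++ '}' :: t') =
      (pvSpec t').map (fun r =>
        cur.takeWhile (· ≠ '{') ++ pvGrp ((cur.dropWhile (· ≠ '{')).tail) ++ r) := by
  induction cur with
  | nil => simp at ho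
  | cons c t ih =>
    simp at ho hc
    by_cases h1 : c = '{'
    · subst h1
      rw [List.cons_append, pvSpec, if_pos rfl]
      have hd : (t ++ '}' :: t').dropWhile (· ≠ '}') = '}' :: t' :=
        dropWhile_all_append t '}' t' (fun y hy e => hc.2 (e ▸ hy))
      have htk : (t ++ '}' :: t').takeWhile (· ≠ '}') = t :=
        takeWhile_all_append t '}' t' (fun y hy e => hc.2 (e ▸ hy))
      simp only [ne_eq] at hd htk ⊢
      simp only [htk]
      split
      · next heq => rw [hd] at heq; cases heq
      · next head t2 heq =>
        rw [hd] at heq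
        injection heq with e1 e2
        subst e2
        simp [List.dropWhile, List.takeWhile]
    · have ho' : '{' ∈ t := by
        rcases ho with h | h
        · exact absurd h.symm h1
        · exact h
      rw [List.cons_append, pvSpec, if_neg h1, ih ho' hc.2]
      rw [List.takeWhile_cons_of_pos (by simp [h1]), List.dropWhile_cons_of_pos (by simp [h1])]
      cases h' : pvSpec t' <;> simp

theorem aLoop_eq_pvSpec (l : List Char) : aLoop l = pvSpec l := by
  induction hn : l.length using Nat.strong_induction_on generalizing l with
  | _ n ih =>
    cases l with
    | nil => rw [aLoop, pvSpec]
    | cons c t =>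
      rw [aLoop]
      split
      · next heq =>
        have hall : ∀ x ∈ c :: t, x ≠ '{' := by
          have := List.dropWhile_eq_nil_iff.mp heq
          intro x hx; have := this x hx; simpa using this
        have hno : '{' ∉ (c :: t) := fun hm => hall _ hm rfl
        rw [pvSpec_no_brace _ hno, List.takeWhile_eq_self_iff.mpr (by intro x hx; simpa using hall x hx)]
      · next d t1 heq =>
        have hd : d = '{' := head_dropWhile_ne _ _ _ heq
        subst hd
        have hpre : '{' ∉ (c :: t).takeWhile (· ≠ '{') := fun hm => by
          have := List.mem_takeWhile_imp hm; simp at this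
        have hform : (c :: t) = (c :: t).takeWhile (· ≠ '{') ++ '{' :: t1 := by
          conv_lhs => rw [← List.takeWhile_append_dropWhile (p := (· ≠ '{')) (l := c :: t)]
          rw [heq]
        have ha : t1.length + 1 ≤ n := by
          have h0 : ((c :: t).dropWhile (· ≠ '{')).length ≤ (c :: t).length :=
            (List.dropWhile_sublist _).length_le
          rw [heq] at h0
          have hn' : t.length + 1 = n := by simpa using hn
          simp at h0; omega
        conv_rhs => rw [hform]
        rw [pvSpec_append _ _ hpre, pvSpec, if_pos rfl]
        split
        · next heq2 => simp
        · next e t2 heq2 =>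
          have hb : t2.length + 1 ≤ t1.length := by
            have h0 : (t1.dropWhile (· ≠ '}')).length ≤ t1.length :=
              (List.dropWhile_sublist _).length_le
            rw [heq2] at h0; simp at h0; omega
          rw [ih t2.length (by omega) t2 rfl]
          cases h' : pvSpec t2 <;> simp

-- prefix of raw text represented by the pending literal chunks
def prefL (lit : List (List Char)) : List Char := (lit.map (· ++ ['}'])).flatten

theorem pvJoinBrace_append (lit : List (List Char)) (x : List Char) :
    pvJoinBrace (lit ++ [x]) = prefL lit ++ x := by
  induction lit with
  | nil => simp [pvJoinBrace, prefL]
  | cons s lit' ih =>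
    cases lit' with
    | nil => simp [pvJoinBrace, prefL]
    | cons s' ss =>
      simp only [List.cons_append] at ih ⊢
      rw [pvJoinBrace, ih]
      simp [prefL]

theorem pvSplitBrace_ne_nil (t : List Char) : pvSplitBrace t ≠ [] := by
  cases t with
  | nil => simp [pvSplitBrace]
  | cons c t' =>
    rw [pvSplitBrace]
    split
    · simp
    · split <;> simp

def consHead (p : List Char) : List (List Char) → List (List Char)
  | [] => [p]
  | s :: ss => (p ++ s) :: ss

theorem consHead_consHead (p c : List Char) (xs : List (List Char)) :
    consHead p (consHead c xs) = consHead (p ++ c) xs := by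
  cases xs <;> simp [consHead]

theorem bGo_eq_pvSpec (t : List Char) (lit : List (List Char)) (cur : List Char)
    (hc : '}' ∉ cur) :
    bGo lit (consHead cur (pvSplitBrace t)) = (pvSpec (cur ++ t)).map (fun r => prefL lit ++ r) := by
  induction t generalizing lit cur with
  | nil =>
    rw [pvSplitBrace]
    simp only [consHead, List.append_nil]
    by_cases ho : '{' ∈ cur
    · simp [bGo, ho, pvSpec_open_none cur ho hc]
    · simp [bGo, ho, pvSpec_no_brace _ ho, pvJoinBrace_append]
  | cons c t' ih =>
    by_cases hcc : c = '}'
    · subst hcc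
      rw [pvSplitBrace, if_pos rfl]
      simp only [consHead, List.append_nil]
      obtain ⟨a, b, hss⟩ : ∃ a b, pvSplitBrace t' = a :: b := by
        cases h : pvSplitBrace t' with
        | nil => exact absurd h (pvSplitBrace_ne_nil t')
        | cons a b => exact ⟨a, b, rfl⟩
      by_cases ho : '{' ∈ cur
      · rw [bGo, if_pos ho, hss]
        have hrw : bGo [] (a :: b) = bGo [] (consHead [] (pvSplitBrace t')) := by
          rw [hss]; simp [consHead]
        rw [show ((a :: b).isEmpty) = false from rfl]
        simp only [Bool.false_eq_true, if_false]
        rw [hrw, ih [] [] (by simp), pvSpec_group cur ho hc t', pvJoinBrace_append]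
        cases h' : pvSpec t' <;> simp [prefL, h']
      · rw [bGo, if_neg ho]
        have hSB : pvSplitBrace t' = consHead [] (pvSplitBrace t') := by
          rw [hss]; simp [consHead]
        rw [hSB, ih (lit ++ [cur]) [] (by simp)]
        have hp : '{' ∉ cur ++ ['}'] := by
          simp
          exact fun h => absurd h ho
        have hassoc : cur ++ '}' :: t' = (cur ++ ['}']) ++ t' := by simp
        rw [hassoc, pvSpec_append _ _ hp]
        cases h' : pvSpec t' <;> simp [prefL, h']
    · have hstep : pvSplitBrace (c :: t') = consHead [c] (pvSplitBrace t') := by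
        rw [pvSplitBrace, if_neg hcc]
        cases h : pvSplitBrace t' with
        | nil => exact absurd h (pvSplitBrace_ne_nil t')
        | cons a b => simp [consHead]
      have hc' : '}' ∉ cur ++ [c] := by
        simp
        exact ⟨hc, fun e => hcc e.symm⟩
      rw [hstep, consHead_consHead, ih lit (cur ++ [c]) hc']
      simp

theorem loops_agree (t : List Char) : aLoop t = bGo [] (pvSplitBrace t) := by
  have hSB : pvSplitBrace t = consHead [] (pvSplitBrace t) := by
    cases h : pvSplitBrace t with
    | nil => exact absurd h (pvSplitBrace_ne_nil t)
    | cons a b => simp [consHead]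
  rw [aLoop_eq_pvSpec, hSB, bGo_eq_pvSpec t [] [] (by simp)]
  cases h' : pvSpec t <;> simp [prefL, h']

-- ===== VERDICT (by name: the statement is the Claim_ definition above) =====
theorem regex_from_route_spec : Claim_equal_regex_from_route := by
  intro route _ _
  unfold Spec_regex_from_route regex_from_route regex_from_route_alt
  rw [loops_agree]
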